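-- pv_equiv track=rewrite | github.com/nikita-konkin/dat-parquet-handler | src/dat_parquet_handler/converter.py | detect_dat_format
-- ===== SOURCE A (Python) =====
-- _DAT_FORMAT_TEC_SUITE = "tec-suite"
--
-- _DAT_FORMAT_TAYABSTEC_SERIES = "tayabstec-series"
--
-- _DAT_FORMAT_TAYABSTEC_DCB = "tayabstec-dcb"
--
-- _DAT_FORMAT_GENERIC = "generic"
--
-- def parse_columns(header_lines: list[str]) -> list[str] | None:
--     prefix = "# Columns:"
--     for line in header_lines:
--         if line.startswith(prefix):
--             cols = line[len(prefix):].strip()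
--             return [c.strip() for c in cols.split(",") if c.strip()]
--     return None
--
-- def parse_tayabstec_series_columns(header_lines: list[str]) -> list[str] | None:
--     for line in header_lines:
--         normalized = line.lstrip("#").strip()
--         if not normalized:
--             continue
--         tokens = normalized.split()
--         if len(tokens) >= 2 and tokens[0] == "UT" and ("I_v" in tokens or "G_lon" in tokens):
--             return tokens
--     return None
--
-- def detect_dat_format(header_lines: list[str]) -> str:
--     if parse_columns(header_lines):
--         return _DAT_FORMAT_TEC_SUITE
--
--     if parse_tayabstec_series_columns(header_lines):
--         return _DAT_FORMAT_TAYABSTEC_SERIES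
--
--     lowered_headers = [line.lower() for line in header_lines]
--     if any("# dcb sat:" in line for line in lowered_headers) or any("# dcb rec:" in line for line in lowered_headers):
--         return _DAT_FORMAT_TAYABSTEC_DCB
--
--     return _DAT_FORMAT_GENERIC
-- ===== SOURCE B (Python) =====
-- _DAT_FORMAT_TEC_SUITE = "tec-suite"
-- _DAT_FORMAT_TAYABSTEC_SERIES = "tayabstec-series"
-- _DAT_FORMAT_TAYABSTEC_DCB = "tayabstec-dcb"
-- _DAT_FORMAT_GENERIC = "generic"
--
-- _COLUMNS_PREFIX = "# Columns:"
--
--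
-- def _columns_ok(line: str) -> bool:
--     """True iff a '# Columns:' line carries at least one non-empty column name."""
--     return any(c.strip() for c in line[len(_COLUMNS_PREFIX):].strip().split(","))
--
--
-- def _is_series_line(line: str) -> bool:
--     tokens = line.lstrip("#").strip().split()
--     return len(tokens) >= 2 and tokens[0] == "UT" and ("I_v" in tokens or "G_lon" in tokens)
--
--
-- def _is_dcb_line(line: str) -> bool:
--     low = line.lower()
--     return "# dcb sat:" in low or "# dcb rec:" in low
--
--
-- def detect_dat_format(header_lines: list[str]) -> str:
--     # Single pass: resolve flags for all three formats in one loop, decide after.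
--     columns_ok = None  # verdict of the FIRST '# Columns:' line, if any
--     has_series = False
--     has_dcb = False
--     for line in header_lines:
--         if columns_ok is None and line.startswith(_COLUMNS_PREFIX):
--             columns_ok = _columns_ok(line)
--         if _is_series_line(line):
--             has_series = True
--         if _is_dcb_line(line):
--             has_dcb = True
--     if columns_ok:
--         return _DAT_FORMAT_TEC_SUITE
--     if has_series:
--         return _DAT_FORMAT_TAYABSTEC_SERIES
--     if has_dcb:
--         return _DAT_FORMAT_TAYABSTEC_DCB
--     return _DAT_FORMAT_GENERIC
-- ===== Notes on version B (the rewrite author's own statement) =====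
-- stated objective: alternative
-- what changed: Replaces A's three separate scans over header_lines (early-return helper per format) by a single pass that accumulates a first-'# Columns:'-line verdict and two booleans, resolving the priority after the loop.
import Mathlib
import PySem

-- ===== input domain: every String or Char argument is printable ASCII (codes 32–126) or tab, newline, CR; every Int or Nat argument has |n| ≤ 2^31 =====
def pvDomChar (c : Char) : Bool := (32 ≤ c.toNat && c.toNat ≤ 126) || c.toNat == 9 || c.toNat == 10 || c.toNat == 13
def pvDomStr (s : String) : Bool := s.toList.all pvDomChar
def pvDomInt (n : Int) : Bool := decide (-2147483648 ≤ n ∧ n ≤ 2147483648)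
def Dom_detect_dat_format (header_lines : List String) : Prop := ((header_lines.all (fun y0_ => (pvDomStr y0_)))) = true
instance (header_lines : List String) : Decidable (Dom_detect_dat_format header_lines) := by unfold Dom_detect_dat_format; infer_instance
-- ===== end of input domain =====

-- B replaces A's three separate scans (one early-return helper per format) by a single
-- pass over header_lines accumulating three flags, deciding the priority after the loop
-- (objective: alternative decomposition, same cost).

-- shared line-level primitives (exact transliterations of the identical per-line Python
-- expressions both versions evaluate)
-- line.lstrip("#"): exact — lstrip with a char set drops leading chars from the set
def pvLstripHash (s : String) : String := String.ofList (s.toList.dropWhile (fun c => c == '#'))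

-- normalized.split() tokens of a line (used by both series checks)
def pvSeriesTokens (line : String) : List String :=
  PySem.Str.split₀ (PySem.Str.strip (pvLstripHash line))

-- len(tokens) >= 2 and tokens[0] == "UT" and ("I_v" in tokens or "G_lon" in tokens)
def pvSeriesCond (tokens : List String) : Bool :=
  decide (2 ≤ tokens.length) && tokens.headD "" == "UT" &&
    (tokens.contains "I_v" || tokens.contains "G_lon")

-- [c.strip() for c in line[len(prefix):].strip().split(",")]
def pvColPieces (line : String) : List String :=
  ((PySem.Str.split? (PySem.Str.strip (PySem.Str.slice line (some 10) none)) ",").getD []).map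
    PySem.Str.strip

-- ===== PORT A =====
-- Python truthiness of an Optional[list]: truthy iff Some nonempty list
def pvTruthyOptList (o : Option (List String)) : Bool :=
  match o with
  | some (_ :: _) => true
  | _ => false

def parse_columns : List String → Option (List String)
  | [] => none
  | line :: rest =>
    if PySem.Str.startswith line "# Columns:" then
      some ((pvColPieces line).filter (fun c => c ≠ ""))
    else parse_columns rest

def parse_tayabstec_series_columns : List String → Option (List String)
  | [] => none
  | line :: rest =>
    let normalized := PySem.Str.strip (pvLstripHash line)
    if normalized == "" then parse_tayabstec_series_columns rest
    else
      let tokens := PySem.Str.split₀ normalized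
      if pvSeriesCond tokens then some tokens
      else parse_tayabstec_series_columns rest

def detect_dat_format (header_lines : List String) : String :=
  if pvTruthyOptList (parse_columns header_lines) then "tec-suite"
  else if pvTruthyOptList (parse_tayabstec_series_columns header_lines) then "tayabstec-series"
  else
    let lowered_headers := header_lines.map PySem.Str.lower
    if lowered_headers.any (fun l => PySem.Str.isIn "# dcb sat:" l) ||
        lowered_headers.any (fun l => PySem.Str.isIn "# dcb rec:" l) then "tayabstec-dcb"
    else "generic"

-- ===== PORT B =====
def pvColumnsOk (line : String) : Bool := (pvColPieces line).any (fun c => c ≠ "")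

def pvIsSeriesLine (line : String) : Bool := pvSeriesCond (pvSeriesTokens line)

def pvIsDcbLine (line : String) : Bool :=
  let low := PySem.Str.lower line
  PySem.Str.isIn "# dcb sat:" low || PySem.Str.isIn "# dcb rec:" low

def pvStepB (st : Option Bool × Bool × Bool) (line : String) : Option Bool × Bool × Bool :=
  let columns_ok :=
    if st.1.isNone && PySem.Str.startswith line "# Columns:" then some (pvColumnsOk line)
    else st.1
  let has_series := if pvIsSeriesLine line then true else st.2.1
  let has_dcb := if pvIsDcbLine line then true else st.2.2
  (columns_ok, has_series, has_dcb)

def detect_dat_format_alt (header_lines : List String) : String :=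
  let st := header_lines.foldl pvStepB (none, false, false)
  if st.1.getD false then "tec-suite"
  else if st.2.1 then "tayabstec-series"
  else if st.2.2 then "tayabstec-dcb"
  else "generic"

-- ===== PRECONDITION & SPEC =====
def Spec_detect_dat_format (header_lines : List String) (out : String) : Prop := out = detect_dat_format_alt header_lines
instance (header_lines : List String) (out : String) : Decidable (Spec_detect_dat_format header_lines out) := by unfold Spec_detect_dat_format; infer_instance

-- ===== CLAIM (what is proved, stated in full; the proofs are below) =====
def Claim_equal_detect_dat_format : Prop := ∀ (header_lines : List String), Dom_detect_dat_format header_lines → Spec_detect_dat_format header_lines (detect_dat_format header_lines)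

-- ===== LEMMAS AND PROOFS =====

-- B's fold in closed form over its three components
theorem foldB_closed (hl : List String) (c : Option Bool) (s d : Bool) :
    hl.foldl pvStepB (c, s, d) =
      (c.or ((hl.find? (fun l => PySem.Str.startswith l "# Columns:")).map pvColumnsOk),
       s || hl.any pvIsSeriesLine, d || hl.any pvIsDcbLine) := by
  induction hl generalizing c s d with
  | nil => simp
  | cons line rest ih =>
    simp only [List.foldl_cons, pvStepB, List.find?_cons, List.any_cons]
    cases hcol : PySem.Str.startswith line "# Columns:" <;>
      cases c <;>
        cases hs : pvIsSeriesLine line <;>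
          cases hd : pvIsDcbLine line <;>
            simp [ih, Bool.or_assoc]

-- A's first check in terms of B's flag
theorem parse_columns_truthy (hl : List String) :
    pvTruthyOptList (parse_columns hl) =
      (((hl.find? (fun l => PySem.Str.startswith l "# Columns:")).map pvColumnsOk).getD false) := by
  induction hl with
  | nil => simp [parse_columns, pvTruthyOptList]
  | cons line rest ih =>
    simp only [parse_columns, List.find?_cons]
    by_cases hcol : PySem.Str.startswith line "# Columns:" = true
    · simp only [hcol]
      cases hfil : (pvColPieces line).filter (fun c => c ≠ "") with
      | nil =>
        have : pvColumnsOk line = false := by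
          simp only [pvColumnsOk]
          rw [List.any_eq_false]
          intro x hx
          have := List.filter_eq_nil_iff.mp hfil x hx
          simpa using this
        simp [pvTruthyOptList, this]
      | cons y ys =>
        have : pvColumnsOk line = true := by
          simp only [pvColumnsOk]
          rw [List.any_eq_true]
          have hy : y ∈ (pvColPieces line).filter (fun c => c ≠ "") := by rw [hfil]; simp
          rw [List.mem_filter] at hy
          exact ⟨y, hy.1, hy.2⟩
        simp [pvTruthyOptList, this]
    · simp only [hcol]
      simp [ih]

-- the series tokens of an empty normalized line fail the condition anyway
theorem seriesCond_empty_normalized (line : String)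
    (h : PySem.Str.strip (pvLstripHash line) == "") :
    pvSeriesCond (pvSeriesTokens line) = false := by
  have h' : PySem.Str.strip (pvLstripHash line) = "" := by simpa using h
  simp only [pvSeriesTokens, pvSeriesCond, h']
  decide

theorem parse_series_truthy (hl : List String) :
    pvTruthyOptList (parse_tayabstec_series_columns hl) = hl.any pvIsSeriesLine := by
  induction hl with
  | nil => simp [parse_tayabstec_series_columns, pvTruthyOptList]
  | cons line rest ih =>
    simp only [parse_tayabstec_series_columns, List.any_cons]
    by_cases hemp : (PySem.Str.strip (pvLstripHash line) == "") = true
    · rw [if_pos hemp, ih, pvIsSeriesLine, seriesCond_empty_normalized line hemp]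
      simp
    · rw [if_neg hemp]
      by_cases hcond : pvSeriesCond (PySem.Str.split₀ (PySem.Str.strip (pvLstripHash line))) = true
      · have hlen : 2 ≤ (PySem.Str.split₀ (PySem.Str.strip (pvLstripHash line))).length := by
          have := hcond
          simp only [pvSeriesCond, Bool.and_eq_true, decide_eq_true_eq] at this
          exact this.1.1
        simp only [hcond]
        have hser : pvIsSeriesLine line = true := by
          simpa [pvIsSeriesLine, pvSeriesTokens] using hcond
        cases htok : PySem.Str.split₀ (PySem.Str.strip (pvLstripHash line)) with
        | nil => rw [htok] at hlen; simp at hlen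
        | cons t ts => simp [pvTruthyOptList, hser]
      · have hser : pvIsSeriesLine line = false := by
          simpa [pvIsSeriesLine, pvSeriesTokens] using hcond
        simp [hcond, ih, hser]

-- A's dcb scan in terms of B's per-line flag
theorem dcb_any (hl : List String) :
    ((hl.map PySem.Str.lower).any (fun l => PySem.Str.isIn "# dcb sat:" l) ||
      (hl.map PySem.Str.lower).any (fun l => PySem.Str.isIn "# dcb rec:" l)) =
      hl.any pvIsDcbLine := by
  induction hl with
  | nil => simp
  | cons line rest ih =>
    simp only [List.map_cons, List.any_cons]
    rw [← ih]
    simp only [pvIsDcbLine]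
    cases PySem.Str.isIn "# dcb sat:" (PySem.Str.lower line) <;>
      cases PySem.Str.isIn "# dcb rec:" (PySem.Str.lower line) <;> simp

-- ===== VERDICT (by name: the statement is the Claim_ definition above) =====
theorem detect_dat_format_spec : Claim_equal_detect_dat_format := by
  intro hl _
  show detect_dat_format hl = detect_dat_format_alt hl
  unfold detect_dat_format detect_dat_format_alt
  rw [foldB_closed, parse_columns_truthy, parse_series_truthy]
  simp only [Option.or, Option.getD]
  rw [← dcb_any]
  rfl
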